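-- pv_equiv track=rewrite | github.com/williain/intertrain | lib/routine.py | __unescape
-- ===== SOURCE A (Python) =====
-- def __unescape(text,char):
--     escaped=False
--     textout=""
--     for c in text:
--         if c=='\\' and not escaped:
--             escaped=True
--         elif c==char and not escaped:
--             textout+='\x0b' # Unprintable bell
--         else:
--             textout+=c
--     return textout
-- ===== SOURCE B (Python) =====
-- def __unescape(text, char):
--     out = []
--     i = 0
--     while i < len(text):
--         c = text[i]
--         if c == '\\':
--             if i + 1 < len(text):
--                 out.append(text[i + 1])
--             i += 2
--         elif c == char:
--             out.append('\x0b')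
--             i += 1
--         else:
--             out.append(c)
--             i += 1
--     return ''.join(out)
-- ===== Notes on version B (the rewrite author's own statement) =====
-- stated objective: alternative
-- what changed: Replaced A's stateful character loop with a never-reset escaped flag by an index-based scan that consumes each backslash together with the character it escapes (emitting that character verbatim) and keeps unescaping the rest, replacing unescaped delimiters with '\x0b'.
-- intended difference: On texts where another backslash or the delimiter occurs after the first backslash and its escaped character, A copies that whole remainder verbatim because its escaped flag is never reset, while B keeps unescaping it (dropping backslashes, escaping the following character, marking unescaped delimiters), which is the intended escape semantics. — e.g. on __unescape("\\a,b,", ","): A returns "a,b,", B returns "a\x0Bb\x0B"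
import Mathlib
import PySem

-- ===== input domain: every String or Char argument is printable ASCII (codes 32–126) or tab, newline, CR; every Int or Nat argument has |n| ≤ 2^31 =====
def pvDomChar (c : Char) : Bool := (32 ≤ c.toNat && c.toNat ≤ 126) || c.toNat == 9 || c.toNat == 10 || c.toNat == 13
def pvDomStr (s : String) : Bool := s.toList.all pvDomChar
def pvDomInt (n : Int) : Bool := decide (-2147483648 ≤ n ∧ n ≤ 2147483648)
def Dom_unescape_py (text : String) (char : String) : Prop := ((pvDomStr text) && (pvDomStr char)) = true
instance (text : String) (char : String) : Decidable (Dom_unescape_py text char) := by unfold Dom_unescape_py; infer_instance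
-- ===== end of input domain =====

-- B scans by index, consuming each backslash together with the character it escapes and
-- continuing to unescape the remainder, instead of A's never-reset escaped flag (objective: alternative).

-- ===== PORT A =====
-- step function for A's loop over the characters of `text`, state = (escaped, textout)
def pvStepA (char : String) (s : Bool × List Char) (c : Char) : Bool × List Char :=
  if c = '\\' ∧ ¬ s.1 then (true, s.2)
  else if String.mk [c] = char ∧ ¬ s.1 then (s.1, s.2 ++ [Char.ofNat 11])
  else (s.1, s.2 ++ [c])

def unescape_py (text : String) (char : String) : String :=
  String.mk (text.toList.foldl (pvStepA char) (false, [])).2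

-- ===== PORT B =====
-- Source B's index loop as structural recursion: a backslash consumes the next character
-- (emitted verbatim), an unescaped delimiter becomes the marker, anything else is copied.
def pvUnescB (char : String) : List Char → List Char
  | [] => []
  | '\\' :: [] => []
  | '\\' :: d :: rest => d :: pvUnescB char rest
  | c :: rest =>
    if String.mk [c] = char then Char.ofNat 11 :: pvUnescB char rest
    else c :: pvUnescB char rest

def unescape_py_alt (text : String) (char : String) : String :=
  String.mk (pvUnescB char text.toList)

-- ===== PRECONDITION & SPEC =====
-- On texts where another backslash or the delimiter occurs after the first backslash and the
-- character it escapes, A copies that remainder verbatim (its escaped flag is never reset);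
-- B keeps unescaping it, which is the intended escape semantics.
def D_unescape_py (text : String) (char : String) : Prop :=
  (((text.toList.dropWhile (fun c => c ≠ '\\')).drop 2).any
    (fun c => decide (c = '\\') || decide (String.mk [c] = char))) = true
instance (text : String) (char : String) : Decidable (D_unescape_py text char) := by
  unfold D_unescape_py; infer_instance

def Spec_unescape_py (text : String) (char : String) (out : String) : Prop :=
  ¬ D_unescape_py text char → out = unescape_py_alt text char
instance (text : String) (char : String) (out : String) : Decidable (Spec_unescape_py text char out) := by
  unfold Spec_unescape_py; infer_instance

def pvDiffWitness_unescape_py : String × String := ("\\a,b,", ",")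
def pvDiffWitnessOut_unescape_py : String × String :=
  ("a,b,", "a\x0Bb\x0B")

-- ===== CLAIM (what is proved, stated in full; the proofs are below) =====
def Claim_unchanged_unescape_py : Prop := ∀ (text : String) (char : String), Dom_unescape_py text char → Spec_unescape_py text char (unescape_py text char)
def Claim_changed_unescape_py : Prop := Dom_unescape_py (pvDiffWitness_unescape_py.1) (pvDiffWitness_unescape_py.2) ∧ D_unescape_py (pvDiffWitness_unescape_py.1) (pvDiffWitness_unescape_py.2) ∧ unescape_py (pvDiffWitness_unescape_py.1) (pvDiffWitness_unescape_py.2) = pvDiffWitnessOut_unescape_py.1 ∧ unescape_py_alt (pvDiffWitness_unescape_py.1) (pvDiffWitness_unescape_py.2) = pvDiffWitnessOut_unescape_py.2 ∧ pvDiffWitnessOut_unescape_py.1 ≠ pvDiffWitnessOut_unescape_py.2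
def Claim_exact_unescape_py : Prop := ∀ (text : String) (char : String), Dom_unescape_py text char → D_unescape_py text char → unescape_py text char ≠ unescape_py_alt text char

-- ===== LEMMAS AND PROOFS =====

-- once escaped, A appends everything verbatim
theorem pvFoldA_true (char : String) (l acc : List Char) :
    l.foldl (pvStepA char) (true, acc) = (true, acc ++ l) := by
  induction l generalizing acc with
  | nil => simp
  | cons c t ih => simp [pvStepA, ih]

-- A's result in closed form: map the prefix before the first backslash, copy the rest verbatim
theorem pvFoldA_false (char : String) (l acc : List Char) :
    (l.foldl (pvStepA char) (false, acc)).2 =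
      acc ++ ((l.takeWhile (fun c => c ≠ '\\')).map
        (fun c => if String.mk [c] = char then Char.ofNat 11 else c)
        ++ (l.dropWhile (fun c => c ≠ '\\')).drop 1) := by
  induction l generalizing acc with
  | nil => simp
  | cons c t ih =>
    by_cases hb : c = '\\'
    · subst hb
      simp [pvStepA, pvFoldA_true]
    · by_cases hc : String.mk [c] = char
      · simp [pvStepA, hb, hc, ih]
      · simp [pvStepA, hb, hc, ih]

-- B is the identity on a list with no backslash and no delimiter occurrence
theorem pvB_id (char : String) (l : List Char)
    (h : ∀ c ∈ l, c ≠ '\\' ∧ String.mk [c] ≠ char) :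
    pvUnescB char l = l := by
  induction l with
  | nil => rfl
  | cons c t ih =>
    have hc := h c (by simp)
    simp [pvUnescB, hc.1, hc.2, ih (fun x hx => h x (by simp [hx]))]

-- B's result when nothing needs unescaping after the first escaped character
theorem pvB_split (char : String) (l : List Char)
    (h : ∀ c ∈ (l.dropWhile (fun c => c ≠ '\\')).drop 2, c ≠ '\\' ∧ String.mk [c] ≠ char) :
    pvUnescB char l =
      (l.takeWhile (fun c => c ≠ '\\')).map
        (fun c => if String.mk [c] = char then Char.ofNat 11 else c)
        ++ (l.dropWhile (fun c => c ≠ '\\')).drop 1 := by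
  induction l with
  | nil => rfl
  | cons c t ih =>
    by_cases hb : c = '\\'
    · subst hb
      cases t with
      | nil => simp [pvUnescB, List.takeWhile, List.dropWhile]
      | cons d t' =>
        have h' : ∀ c ∈ t', c ≠ '\\' ∧ String.mk [c] ≠ char := by
          intro x hx
          apply h
          simp [List.dropWhile, hx]
        simp [pvUnescB, List.takeWhile, List.dropWhile, pvB_id char t' h']
    · have hd : (List.dropWhile (fun c => c ≠ '\\') (c :: t)) = List.dropWhile (fun c => c ≠ '\\') t := by
        simp [List.dropWhile, hb]
      have ht : (List.takeWhile (fun c => c ≠ '\\') (c :: t)) = c :: List.takeWhile (fun c => c ≠ '\\') t := by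
        simp [List.takeWhile, hb]
      rw [hd] at h
      by_cases hc : String.mk [c] = char
      · simp [pvUnescB, hb, hc, ih h]
      · simp [pvUnescB, hb, hc, ih h]

-- B never lengthens, and strictly shortens when a backslash is present
theorem pvB_len_le (char : String) (l : List Char) :
    (pvUnescB char l).length ≤ l.length := by
  induction l using pvUnescB.induct char with
  | _ => simp_all [pvUnescB]; try omega

theorem pvB_len_lt (char : String) (l : List Char) (h : '\\' ∈ l) :
    (pvUnescB char l).length < l.length := by
  induction l using pvUnescB.induct char with
  | case1 => simp at h
  | case2 => simp [pvUnescB]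
  | case3 d rest ih =>
    have := pvB_len_le char rest
    simp [pvUnescB]; omega
  | case4 c rest h1 h2 hc ih =>
    have hb : c ≠ '\\' := by
      intro he
      cases rest with
      | nil => exact h1 he rfl
      | cons d r => exact h2 d r he rfl
    have hm : '\\' ∈ rest := by
      rcases List.mem_cons.1 h with h3 | h3
      · exact absurd h3.symm hb
      · exact h3
    simp [pvUnescB, hc]
    exact ih hm
  | case5 c rest h1 h2 hc ih =>
    have hb : c ≠ '\\' := by
      intro he
      cases rest with
      | nil => exact h1 he rfl
      | cons d r => exact h2 d r he rfl
    have hm : '\\' ∈ rest := by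
      rcases List.mem_cons.1 h with h3 | h3
      · exact absurd h3.symm hb
      · exact h3
    simp [pvUnescB, hc]
    exact ih hm

-- if some character needs unescaping, B changes the list (delimiter marker ≠ any Dom character)
theorem pvB_ne (char : String) (hchar : pvDomStr char = true) (l : List Char)
    (h : ∃ c ∈ l, c = '\\' ∨ String.mk [c] = char) :
    pvUnescB char l ≠ l := by
  induction l using pvUnescB.induct char with
  | case1 => simp at h
  | case2 => simp [pvUnescB]
  | case3 d rest ih =>
    intro he
    have hlt : (pvUnescB char ('\\' :: d :: rest)).length < ('\\' :: d :: rest).length :=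
      pvB_len_lt char _ (by simp)
    rw [he] at hlt
    omega
  | case4 c rest h1 h2 hc ih =>
    -- c is the delimiter: the marker '\x0b' is not a Dom character, so it differs from c
    have hdc : pvDomChar c = true := by
      have hl : char.toList = [c] := by
        rw [← hc]; exact String.toList_ofList
      unfold pvDomStr at hchar
      rw [hl] at hchar
      simpa using hchar
    have hne : Char.ofNat 11 ≠ c := by
      intro hceq
      rw [← hceq] at hdc
      simp [pvDomChar] at hdc
    simp [pvUnescB, hc]
    intro he _
    exact hne he
  | case5 c rest h1 h2 hc ih =>
    have hb : c ≠ '\\' := by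
      intro he
      cases rest with
      | nil => exact h1 he rfl
      | cons d r => exact h2 d r he rfl
    have hm : ∃ x ∈ rest, x = '\\' ∨ String.mk [x] = char := by
      rcases h with ⟨x, hx, hor⟩
      rcases List.mem_cons.1 hx with h3 | h3
      · subst h3
        rcases hor with h4 | h4
        · exact absurd h4 hb
        · exact absurd h4 hc
      · exact ⟨x, h3, hor⟩
    simp [pvUnescB, hc]
    exact ih hm

-- convert ¬D_ into the pointwise condition used by pvB_split
theorem pvD_neg (text char : String) (h : ¬ D_unescape_py text char) :
    ∀ c ∈ (text.toList.dropWhile (fun c => c ≠ '\\')).drop 2,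
      c ≠ '\\' ∧ String.mk [c] ≠ char := by
  unfold D_unescape_py at h
  intro c hc
  by_contra hcon
  apply h
  rw [List.any_eq_true]
  refine ⟨c, hc, ?_⟩
  rw [not_and_or, not_not] at hcon
  by_cases h1 : c = '\\'
  · simp [h1]
  · rcases hcon with h2 | h2
    · exact absurd h2 h1
    · rw [not_not] at h2
      simp [h1, h2]

-- ===== VERDICT (by name: the statements are the Claim_ definitions above) =====
theorem unescape_py_spec : Claim_unchanged_unescape_py := by
  intro text char _ hnd
  unfold unescape_py unescape_py_alt
  rw [pvFoldA_false, pvB_split char _ (pvD_neg text char hnd)]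
  simp

theorem unescape_py_changed : Claim_changed_unescape_py := by
  unfold Claim_changed_unescape_py; decide

theorem unescape_py_tight : Claim_exact_unescape_py := by
  intro text char hdom hd
  have hchar : pvDomStr char = true := by
    unfold Dom_unescape_py at hdom
    rw [Bool.and_eq_true] at hdom
    exact hdom.2
  unfold unescape_py unescape_py_alt
  intro he
  have hlists :
      (text.toList.foldl (pvStepA char) (false, [])).2 = pvUnescB char text.toList := by
    exact String.ofList_injective he
  -- decompose text at its first backslash; D_ forces the shape pre ++ '\' :: d :: rest
  have hsplit := List.takeWhile_append_dropWhile (p := fun c => c ≠ '\\') (l := text.toList)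
  unfold D_unescape_py at hd
  rcases hdw : text.toList.dropWhile (fun c => c ≠ '\\') with _ | ⟨b, m⟩
  · rw [hdw] at hd; simp at hd
  · have hb : b = '\\' := by
      by_contra hbne
      have := List.head?_dropWhile_not (p := fun c => c ≠ '\\') (l := text.toList)
      rw [hdw] at this
      simp [hbne] at this
    subst hb
    rcases m with _ | ⟨d, rest⟩
    · rw [hdw] at hd; simp at hd
    · rw [hdw] at hd
      simp only [List.drop] at hd
      have hrest : ∃ c ∈ rest, c = '\\' ∨ String.mk [c] = char := by
        rw [List.any_eq_true] at hd
        rcases hd with ⟨c, hc, hp⟩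
        refine ⟨c, by simpa using hc, ?_⟩
        rw [Bool.or_eq_true] at hp
        rcases hp with h1 | h1
        · exact Or.inl (of_decide_eq_true h1)
        · exact Or.inr (of_decide_eq_true h1)
      -- A's side: map(pre) ++ d :: rest ; B's side: map(pre) ++ d :: pvUnescB rest
      have hpre : ∀ c ∈ text.toList.takeWhile (fun c => c ≠ '\\'), c ≠ '\\' := by
        intro c hc
        have := List.mem_takeWhile_imp hc
        simpa using this
      have hA := pvFoldA_false char text.toList []
      rw [hdw] at hA
      have hBfull : pvUnescB char text.toList =
          (text.toList.takeWhile (fun c => c ≠ '\\')).map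
            (fun c => if String.mk [c] = char then Char.ofNat 11 else c)
            ++ d :: pvUnescB char rest := by
        conv_lhs => rw [← hsplit, hdw]
        generalize text.toList.takeWhile (fun c => c ≠ '\\') = pre at hpre
        clear hsplit hdw hA hlists
        induction pre with
        | nil => simp [pvUnescB]
        | cons x xs ih =>
          have hx := hpre x (by simp)
          have ihx := ih (fun c hc => hpre c (by simp [hc]))
          by_cases hxc : String.mk [x] = char
          · simp [pvUnescB, hx, hxc, ihx]
          · simp [pvUnescB, hx, hxc, ihx]
      rw [hA, hBfull] at hlists
      simp only [List.nil_append, List.append_cancel_left_eq, List.drop] at hlists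
      have hfin : pvUnescB char rest = rest := by
        injection hlists with h7 h8
        exact h8.symm
      exact pvB_ne char hchar rest hrest hfin
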